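-- pv_equiv track=rewrite | github.com/Lena2407/AIandtheWeb2024-25 | Task2/crawler.py | find_sentence_with_term
-- ===== SOURCE A (Python) =====
-- def find_sentence_with_term(text, term):
--
--     term_index = text.lower().find(term.lower())
--     if term_index == -1:
--         return ""
--
--     # Find start of sentence (go backwards to find previous separator or start of text)
--     start = term_index
--     sentence_separators = '.!?'
--     while start > 0 and text[start-1] not in sentence_separators:
--         start -= 1
--     # Skip leading whitespace
--     while start < len(text) and text[start].isspace():
--         start += 1
--
--     # Find end of sentence (next separator or end of text)
--     end = term_index
--     while end < len(text) and text[end] not in sentence_separators: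
--         end += 1
--     if end < len(text):  # include the separator if we found one
--         end += 1
--
--     sentence = text[start:end].strip()
--     # Truncate if too long
--     if len(sentence) > 150:
--         return sentence[:147] + "..."
--
--     return sentence
-- ===== SOURCE B (Python) =====
-- def find_sentence_with_term(text, term):
--     term_index = text.lower().find(term.lower())
--     if term_index == -1:
--         return ""
--
--     # Build all sentence spans [a, b) up front: each runs from just after the
--     # previous separator to just past the next one (final span to end of text).
--     separators = '.!?'
--     spans = []
--     s = 0
--     for i, ch in enumerate(text):
--         if ch in separators:
--             spans.append((s, i + 1))
--             s = i + 1
--     spans.append((s, len(text)))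
--
--     # Select the span whose half-open range contains term_index.
--     a, b = next((sp for sp in spans if term_index < sp[1]), spans[-1])
--
--     sentence = text[a:b].strip()
--     if len(sentence) > 150:
--         return sentence[:147] + "..."
--     return sentence
-- ===== Notes on version B (the rewrite author's own statement) =====
-- stated objective: alternative
-- what changed: A's bidirectional character-by-character scan outward from the hit (plus a separate leading-whitespace skip) is replaced by one forward pass that builds the list of all sentence spans and then selects the span containing the hit index; strip() subsumes the whitespace skip.
import Mathlib
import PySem

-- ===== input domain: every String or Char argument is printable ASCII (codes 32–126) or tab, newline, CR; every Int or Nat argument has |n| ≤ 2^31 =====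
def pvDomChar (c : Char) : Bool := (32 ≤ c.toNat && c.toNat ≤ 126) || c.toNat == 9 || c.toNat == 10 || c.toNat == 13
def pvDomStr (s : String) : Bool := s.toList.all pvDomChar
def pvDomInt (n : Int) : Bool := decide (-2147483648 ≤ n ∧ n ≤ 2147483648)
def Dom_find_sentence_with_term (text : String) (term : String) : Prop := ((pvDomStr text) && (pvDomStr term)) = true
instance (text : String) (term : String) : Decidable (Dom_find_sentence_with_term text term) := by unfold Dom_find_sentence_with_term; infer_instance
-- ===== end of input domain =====

-- B replaces A's bidirectional char-by-char scan around the hit with a single forward pass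
-- that builds all sentence spans and selects the one containing the hit (objective: alternative decomposition).

-- ===== PORT A =====
-- 'c in ".!?"'
def pvIsSep (c : Char) : Bool := c == '.' || c == '!' || c == '?'

-- 'while start > 0 and text[start-1] not in sentence_separators: start -= 1'
def pvAStart (cs : List Char) : Nat → Nat
  | 0 => 0
  | n + 1 => if pvIsSep (cs.getD n ' ') then n + 1 else pvAStart cs n

-- 'while start < len(text) and text[start].isspace(): start += 1'
def pvASkipWs (cs : List Char) (s : Nat) : Nat :=
  if h : s < cs.length then
    if PySem.Chars.isspace (cs.getD s ' ') then pvASkipWs cs (s + 1) else s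
  else s
termination_by cs.length - s

-- 'while end < len(text) and text[end] not in sentence_separators: end += 1'
def pvAEnd (cs : List Char) (e : Nat) : Nat :=
  if h : e < cs.length then
    if pvIsSep (cs.getD e ' ') then e else pvAEnd cs (e + 1)
  else e
termination_by cs.length - e

def find_sentence_with_term (text : String) (term : String) : String :=
  let termIndex : Int := PySem.Str.find (PySem.Str.lower text) (PySem.Str.lower term)
  if termIndex = -1 then ""
  else
    let cs := text.toList
    let start0 := pvAStart cs termIndex.toNat
    let start := pvASkipWs cs start0
    let e0 := pvAEnd cs termIndex.toNat
    let e := if e0 < cs.length then e0 + 1 else e0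
    let sentence := PySem.Chars.strip (PySem.List.slice cs (some (start : Int)) (some (e : Int)))
    if 150 < sentence.length then String.ofList (sentence.take 147 ++ ['.', '.', '.'])
    else String.ofList sentence

-- ===== PORT B =====
-- body of 'for i, ch in enumerate(text): if ch in separators: spans.append((s, i+1)); s = i+1'
def pvBStep (acc : List (Nat × Nat) × Nat) (ic : Int × Char) : List (Nat × Nat) × Nat :=
  if pvIsSep ic.2 then (acc.1 ++ [(acc.2, ic.1.toNat + 1)], ic.1.toNat + 1) else acc

-- the span-building pass, plus 'spans.append((s, len(text)))'
def pvBSpans (cs : List Char) : List (Nat × Nat) :=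
  let p := (PySem.List.enumerate cs).foldl pvBStep ([], 0)
  p.1 ++ [(p.2, cs.length)]

def find_sentence_with_term_alt (text : String) (term : String) : String :=
  let termIndex : Int := PySem.Str.find (PySem.Str.lower text) (PySem.Str.lower term)
  if termIndex = -1 then ""
  else
    let cs := text.toList
    let spans := pvBSpans cs
    -- 'next((sp for sp in spans if term_index < sp[1]), spans[-1])'
    let sp := ((spans.find? fun q => termIndex < (q.2 : Int)).getD
      ((PySem.List.pyGet? spans (-1)).getD (0, 0)))
    let sentence := PySem.Chars.strip (PySem.List.slice cs (some (sp.1 : Int)) (some (sp.2 : Int)))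
    if 150 < sentence.length then String.ofList (sentence.take 147 ++ ['.', '.', '.'])
    else String.ofList sentence

-- ===== PRECONDITION & SPEC =====
def Spec_find_sentence_with_term (text : String) (term : String) (out : String) : Prop := out = find_sentence_with_term_alt text term
instance (text : String) (term : String) (out : String) : Decidable (Spec_find_sentence_with_term text term out) := by unfold Spec_find_sentence_with_term; infer_instance

-- ===== CLAIM (what is proved, stated in full; the proofs are below) =====
def Claim_equal_find_sentence_with_term : Prop := ∀ (text : String) (term : String), Dom_find_sentence_with_term text term → Spec_find_sentence_with_term text term (find_sentence_with_term text term)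

-- ===== LEMMAS AND PROOFS =====

lemma pvIsSep_not_space {c : Char} (h : pvIsSep c = true) : PySem.Chars.isspace c = false := by
  simp only [pvIsSep, Bool.or_eq_true, beq_iff_eq] at h
  rcases h with (h | h) | h <;> subst h <;> decide

lemma pvAStart_spec (cs : List Char) (t : Nat) :
    pvAStart cs t ≤ t ∧
    (∀ k, pvAStart cs t ≤ k → k < t → pvIsSep (cs.getD k ' ') = false) ∧
    (pvAStart cs t = 0 ∨ pvIsSep (cs.getD (pvAStart cs t - 1) ' ') = true) := by
  induction t with
  | zero => simp [pvAStart]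
  | succ n ih =>
    by_cases h : pvIsSep (cs.getD n ' ') = true
    · have heq : pvAStart cs (n + 1) = n + 1 := by
        simp only [pvAStart]
        rw [if_pos h]
      rw [heq]
      exact ⟨le_refl _, fun k hk1 hk2 => by omega, Or.inr (by simpa using h)⟩
    · have heq : pvAStart cs (n + 1) = pvAStart cs n := by
        simp only [pvAStart]
        rw [if_neg h]
      rw [heq]
      obtain ⟨h1, h2, h3⟩ := ih
      refine ⟨by omega, ?_, h3⟩
      intro k hk1 hk2
      rcases Nat.lt_or_ge k n with hk | hk
      · exact h2 k hk1 hk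
      · have hkn : k = n := by omega
        subst hkn
        simp only [Bool.not_eq_true] at h
        exact h

lemma pvASkipWs_spec (cs : List Char) (s : Nat) (hs : s ≤ cs.length) :
    s ≤ pvASkipWs cs s ∧ pvASkipWs cs s ≤ cs.length ∧
    (∀ k, s ≤ k → k < pvASkipWs cs s → PySem.Chars.isspace (cs.getD k ' ') = true) ∧
    (pvASkipWs cs s = cs.length ∨ PySem.Chars.isspace (cs.getD (pvASkipWs cs s) ' ') = false) := by
  fun_induction pvASkipWs cs s with
  | case1 s h hw ih =>
    obtain ⟨i1, i2, i3, i4⟩ := ih (by omega)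
    refine ⟨by omega, i2, ?_, i4⟩
    intro k hk1 hk2
    rcases Nat.lt_or_ge k (s + 1) with hk | hk
    · have : k = s := by omega
      subst this; exact hw
    · exact i3 k hk hk2
  | case2 s h hw =>
    exact ⟨le_refl _, by omega, fun k hk1 hk2 => by omega, Or.inr (by simpa using hw)⟩
  | case3 s h =>
    exact ⟨le_refl _, by omega, fun k hk1 hk2 => by omega, Or.inl (by omega)⟩

lemma pvAEnd_spec (cs : List Char) (t : Nat) (ht : t ≤ cs.length) :
    t ≤ pvAEnd cs t ∧ pvAEnd cs t ≤ cs.length ∧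
    (∀ k, t ≤ k → k < pvAEnd cs t → pvIsSep (cs.getD k ' ') = false) ∧
    (pvAEnd cs t = cs.length ∨ pvIsSep (cs.getD (pvAEnd cs t) ' ') = true) := by
  fun_induction pvAEnd cs t with
  | case1 e h hsep =>
    exact ⟨le_refl _, by omega, fun k hk1 hk2 => by omega, Or.inr hsep⟩
  | case2 e h hsep ih =>
    obtain ⟨i1, i2, i3, i4⟩ := ih (by omega)
    refine ⟨by omega, i2, ?_, i4⟩
    intro k hk1 hk2
    rcases Nat.lt_or_ge k (e + 1) with hk | hk
    · have : k = e := by omega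
      subst this; simpa using hsep
    · exact i3 k hk hk2
  | case3 e h =>
    exact ⟨le_refl _, by omega, fun k hk1 hk2 => by omega, Or.inl (by omega)⟩

-- the chain of sentence spans: consecutive, each ending just past a separator,
-- no separator strictly inside, running from position x up to position y
def pvChain (cs : List Char) : Nat → List (Nat × Nat) → Nat → Prop
  | x, [], y => x = y
  | x, sp :: rest, y =>
    sp.1 = x ∧ x < sp.2 ∧ sp.2 ≤ cs.length ∧ pvIsSep (cs.getD (sp.2 - 1) ' ') = true ∧
    (∀ k, x ≤ k → k < sp.2 - 1 → pvIsSep (cs.getD k ' ') = false) ∧ pvChain cs sp.2 rest y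

lemma pvChain_append_char (cs : List Char) (c : Char) (x y : Nat) (spans : List (Nat × Nat))
    (h : pvChain cs x spans y) : pvChain (cs ++ [c]) x spans y := by
  induction spans generalizing x with
  | nil => exact h
  | cons sp rest ih =>
    obtain ⟨h1, h2, h3, h4, h5, h6⟩ := h
    refine ⟨h1, h2, by simp; omega, ?_, ?_, ih _ h6⟩
    · rwa [List.getD_append _ _ _ _ (by omega)]
    · intro k hk1 hk2
      rw [List.getD_append _ _ _ _ (by omega)]
      exact h5 k hk1 hk2

lemma pvChain_snoc (cs : List Char) (x y z : Nat) (spans : List (Nat × Nat))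
    (h : pvChain cs x spans y) (hyz : y < z) (hz : z ≤ cs.length)
    (hsep : pvIsSep (cs.getD (z - 1) ' ') = true)
    (hno : ∀ k, y ≤ k → k < z - 1 → pvIsSep (cs.getD k ' ') = false) :
    pvChain cs x (spans ++ [(y, z)]) z := by
  induction spans generalizing x with
  | nil =>
    have hxy : x = y := h
    subst hxy
    exact ⟨rfl, hyz, hz, hsep, hno, rfl⟩
  | cons sp rest ih =>
    obtain ⟨h1, h2, h3, h4, h5, h6⟩ := h
    exact ⟨h1, h2, h3, h4, h5, ih _ h6⟩

lemma pvSpans_inv (cs : List Char) :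
    pvChain cs 0 ((PySem.List.enumerate cs).foldl pvBStep ([], 0)).1
      ((PySem.List.enumerate cs).foldl pvBStep ([], 0)).2 ∧
    ((PySem.List.enumerate cs).foldl pvBStep ([], 0)).2 ≤ cs.length ∧
    (∀ k, ((PySem.List.enumerate cs).foldl pvBStep ([], 0)).2 ≤ k → k < cs.length →
      pvIsSep (cs.getD k ' ') = false) := by
  induction cs using List.reverseRecOn with
  | nil =>
    refine ⟨rfl, by simp [PySem.List.enumerate], ?_⟩
    intro k h1 h2
    simp at h2
  | append_singleton cs c ih =>
    obtain ⟨i1, i2, i3⟩ := ih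
    have henum : PySem.List.enumerate (cs ++ [c]) 0
        = PySem.List.enumerate cs 0 ++ [((cs.length : Int), c)] := by
      simp [PySem.List.enumerate_append, PySem.List.enumerate]
    rw [henum, List.foldl_append]
    set p := (PySem.List.enumerate cs).foldl pvBStep ([], 0) with hp
    by_cases hsep : pvIsSep c = true
    · have hstep : List.foldl pvBStep p [((cs.length : Int), c)]
          = (p.1 ++ [(p.2, cs.length + 1)], cs.length + 1) := by
        simp [pvBStep, hsep]
      rw [hstep]
      refine ⟨?_, by simp, ?_⟩
      · refine pvChain_snoc _ _ _ _ _ (pvChain_append_char cs c _ _ _ i1) (by omega)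
          (by simp) ?_ ?_
        · have hg : (cs ++ [c]).getD (cs.length + 1 - 1) ' ' = c := by simp
          rw [hg]; exact hsep
        · intro k hk1 hk2
          rw [List.getD_append _ _ _ _ (by omega)]
          exact i3 k hk1 (by omega)
      · intro k h1 h2
        simp only [List.length_append, List.length_cons, List.length_nil] at h2
        omega
    · have hstep : List.foldl pvBStep p [((cs.length : Int), c)] = p := by
        simp [pvBStep, hsep]
      rw [hstep]
      refine ⟨pvChain_append_char cs c _ _ _ i1, by simp; omega, ?_⟩
      intro k hk1 hk2
      simp only [List.length_append, List.length_cons, List.length_nil] at hk2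
      rcases Nat.lt_or_ge k cs.length with hk | hk
      · rw [List.getD_append _ _ _ _ hk]
        exact i3 k hk1 hk
      · have hkc : k = cs.length := by omega
        subst hkc
        have hg : (cs ++ [c]).getD cs.length ' ' = c := by simp
        rw [hg]
        simpa using hsep

-- the selected span: first span whose right end is past t
lemma pvSelect (cs : List Char) (t : Nat) (ht : t < cs.length) :
    ∀ (spans : List (Nat × Nat)) (x y : Nat),
    pvChain cs x spans y → x ≤ t → (x = 0 ∨ pvIsSep (cs.getD (x - 1) ' ') = true) →
    (∀ k, y ≤ k → k < cs.length → pvIsSep (cs.getD k ' ') = false) →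
    ∃ sp, ((spans ++ [(y, cs.length)]).find? fun q => (t : Int) < (q.2 : Int)) = some sp ∧
      sp.1 ≤ t ∧ t < sp.2 ∧ sp.2 ≤ cs.length ∧
      (sp.1 = 0 ∨ pvIsSep (cs.getD (sp.1 - 1) ' ') = true) ∧
      (∀ k, sp.1 ≤ k → k < t → pvIsSep (cs.getD k ' ') = false) ∧
      ((sp.2 = cs.length ∧ ∀ k, t ≤ k → k < cs.length → pvIsSep (cs.getD k ' ') = false) ∨
       (pvIsSep (cs.getD (sp.2 - 1) ' ') = true ∧
        ∀ k, t ≤ k → k < sp.2 - 1 → pvIsSep (cs.getD k ' ') = false)) := by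
  intro spans
  induction spans with
  | nil =>
    intro x y hch hx hxsep htail
    have hxy : x = y := hch
    subst hxy
    refine ⟨(x, cs.length), ?_, hx, ht, le_refl _, hxsep, ?_, Or.inl ⟨rfl, ?_⟩⟩
    · rw [List.nil_append, List.find?_cons_of_pos]
      simpa using (by exact_mod_cast ht : (t : Int) < (cs.length : Int))
    · intro k hk1 hk2
      exact htail k hk1 (by omega)
    · intro k hk1 hk2
      exact htail k (by omega) hk2
  | cons sp rest ih =>
    intro x y hch hx hxsep htail
    obtain ⟨h1, h2, h3, h4, h5, h6⟩ := hch
    by_cases hlt : t < sp.2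
    · refine ⟨sp, ?_, by omega, hlt, h3, by rw [h1]; exact hxsep, ?_, Or.inr ⟨h4, ?_⟩⟩
      · rw [List.cons_append, List.find?_cons_of_pos]
        simpa using (by exact_mod_cast hlt : (t : Int) < (sp.2 : Int))
      · intro k hk1 hk2
        exact h5 k (by omega) (by omega)
      · intro k hk1 hk2
        exact h5 k (by omega) hk2
    · obtain ⟨sp', hfind, hrest⟩ := ih sp.2 y h6 (by omega) (Or.inr h4) htail
      refine ⟨sp', ?_, hrest⟩
      rw [List.cons_append, List.find?_cons_of_neg, hfind]
      simpa using (by exact_mod_cast hlt : ¬ ((t : Int) < (sp.2 : Int)))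

lemma pvStrip_ws_prefix (w u : List Char) (hw : ∀ c ∈ w, PySem.Chars.isspace c = true) :
    PySem.Chars.strip (w ++ u) = PySem.Chars.strip u := by
  have hdw : List.dropWhile PySem.Chars.isspace w = [] := by
    rw [List.dropWhile_eq_nil_iff]
    exact fun x hx => hw x hx
  simp [PySem.Chars.strip, PySem.Chars.lstrip, List.dropWhile_append, hdw]

-- the heart: for a hit at index t inside the text, A's scanned sentence equals B's selected span
lemma pvCore (cs : List Char) (t : Nat) (ht : t < cs.length) :
    ∃ sp : Nat × Nat, ((pvBSpans cs).find? fun q => (t : Int) < (q.2 : Int)) = some sp ∧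
      PySem.Chars.strip (PySem.List.slice cs (some ((pvASkipWs cs (pvAStart cs t) : Nat) : Int))
        (some (((if pvAEnd cs t < cs.length then pvAEnd cs t + 1 else pvAEnd cs t) : Nat) : Int)))
      = PySem.Chars.strip (PySem.List.slice cs (some (sp.1 : Int)) (some (sp.2 : Int))) := by
  obtain ⟨ich, i2, i3⟩ := pvSpans_inv cs
  obtain ⟨sp, hfind, hsp1, hsp2, hsp3, hsp4, hsp5, hsp6⟩ :=
    pvSelect cs t ht _ 0 _ ich (by omega) (Or.inl rfl) i3
  refine ⟨sp, hfind, ?_⟩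
  -- A's pieces
  obtain ⟨a1, a2, a3⟩ := pvAStart_spec cs t
  set a0 := pvAStart cs t with ha0
  obtain ⟨w1, w2, w3, w4⟩ := pvASkipWs_spec cs a0 (by omega)
  set a := pvASkipWs cs a0 with ha
  obtain ⟨e1, e2, e3, e4⟩ := pvAEnd_spec cs t (by omega)
  set e0 := pvAEnd cs t with he0
  -- start indices agree before whitespace skipping
  have hstart : sp.1 = a0 := by
    rcases Nat.lt_trichotomy sp.1 a0 with h | h | h
    · rcases a3 with h0 | hsep
      · omega
      · have hf := hsp5 (a0 - 1) (by omega) (by omega)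
        rw [hf] at hsep
        exact Bool.noConfusion hsep
    · exact h
    · rcases hsp4 with h0 | hsep
      · omega
      · have hf := a2 (sp.1 - 1) (by omega) (by omega)
        rw [hf] at hsep
        exact Bool.noConfusion hsep
  -- end indices agree
  have hend : (if e0 < cs.length then e0 + 1 else e0) = sp.2 := by
    rcases hsp6 with ⟨hb, hno⟩ | ⟨hbsep, hno⟩
    · have he0len : e0 = cs.length := by
        rcases e4 with h | hsep
        · exact h
        · by_cases hc : e0 < cs.length
          · have hf := hno e0 (by omega) hc
            rw [hf] at hsep
            exact Bool.noConfusion hsep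
          · omega
      rw [he0len]
      simp [hb]
    · have he0b : e0 = sp.2 - 1 := by
        rcases Nat.lt_trichotomy e0 (sp.2 - 1) with h | h | h
        · rcases e4 with hlen | hsep
          · omega
          · have hf := hno e0 (by omega) h
            rw [hf] at hsep
            exact Bool.noConfusion hsep
        · exact h
        · have hf := e3 (sp.2 - 1) (by omega) (by omega)
          rw [hf] at hbsep
          exact Bool.noConfusion hbsep
      have hlt : e0 < cs.length := by omega
      rw [if_pos hlt]
      omega
  -- the skipped whitespace cannot pass the end of the selected span
  have hale : a ≤ sp.2 := by
    rcases hsp6 with ⟨hb, _⟩ | ⟨hbsep, _⟩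
    · omega
    · by_contra hc
      have hws := w3 (sp.2 - 1) (by omega) (by omega)
      have hns := pvIsSep_not_space hbsep
      rw [hws] at hns
      exact Bool.noConfusion hns
  -- the skipped prefix consists of whitespace only
  have hwchars : ∀ c ∈ List.take (a - a0) (List.drop a0 cs), PySem.Chars.isspace c = true := by
    intro c hc
    rw [List.mem_iff_getElem] at hc
    obtain ⟨j, hj, hcj⟩ := hc
    have hj1 : j < a - a0 := lt_of_lt_of_le hj (by simp [List.length_take])
    have hj2 : a0 + j < cs.length := by omega
    have hw := w3 (a0 + j) (by omega) (by omega)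
    rw [List.getD_eq_getElem _ _ hj2] at hw
    rw [← hcj]
    have hg : (List.take (a - a0) (List.drop a0 cs))[j] = cs[a0 + j] := by
      rw [List.getElem_take, List.getElem_drop]
    rw [hg]
    exact hw
  have hsplit : List.take (sp.2 - a0) (List.drop a0 cs)
      = List.take (a - a0) (List.drop a0 cs) ++ List.take (sp.2 - a) (List.drop a cs) := by
    have h1 : sp.2 - a0 = (a - a0) + (sp.2 - a) := by omega
    rw [h1, List.take_add, List.drop_drop]
    rw [show a0 + (a - a0) = a from by omega]
  rw [hstart, hend, PySem.List.slice_natCast, PySem.List.slice_natCast, hsplit,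
    pvStrip_ws_prefix _ _ hwchars]

-- t = len(text) forces empty text (find returns the length only when the needle is empty)
lemma pvFind_lt_of_ne (cs sub : List Char) (hne : cs ≠ [])
    (h : PySem.Chars.find cs sub ≠ -1) : (PySem.Chars.find cs sub).toNat < cs.length := by
  have h0 : 0 ≤ PySem.Chars.find cs sub := by
    have := PySem.Chars.neg_one_le_find cs sub
    omega
  have hle : PySem.Chars.find cs sub ≤ (cs.length : Int) := PySem.Chars.find_le_length cs sub
  by_contra hcon
  have heq : (PySem.Chars.find cs sub).toNat = cs.length := by omega
  obtain ⟨hpre, -⟩ := PySem.Chars.find_spec h0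
  rw [heq, List.drop_length] at hpre
  have hsubnil : sub = [] := List.prefix_nil.mp hpre
  subst hsubnil
  rw [PySem.Chars.find_nil] at heq
  simp at heq
  exact hne (List.eq_nil_of_length_eq_zero heq.symm)

-- ===== VERDICT (by name: the statement is the Claim_ definition above) =====
theorem find_sentence_with_term_spec : Claim_equal_find_sentence_with_term := by
  intro text term _
  unfold Spec_find_sentence_with_term find_sentence_with_term find_sentence_with_term_alt
  simp only [PySem.Str.find_eq, PySem.Str.toList_lower]
  set C := PySem.Chars.find (PySem.Chars.lower text.toList) (PySem.Chars.lower term.toList)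
    with hC
  by_cases hI : C = -1
  · rw [if_pos hI, if_pos hI]
  · rw [if_neg hI, if_neg hI]
    have h0 : 0 ≤ C := by
      have := PySem.Chars.neg_one_le_find (PySem.Chars.lower text.toList)
        (PySem.Chars.lower term.toList)
      rw [← hC] at this
      omega
    have hcast : C = ((C.toNat : Nat) : Int) := (Int.toNat_of_nonneg h0).symm
    by_cases hnil : text.toList = []
    · have hF0 : C.toNat = 0 := by
        have hle : C ≤ ((PySem.Chars.lower text.toList).length : Int) := by
          rw [hC]
          exact PySem.Chars.find_le_length _ _
        rw [hnil] at hle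
        simp [PySem.Chars.lower] at hle
        omega
      rw [hnil, hcast]
      simp only [Int.toNat_natCast]
      rw [hF0]
      have h1 : pvASkipWs ([] : List Char) 0 = 0 := by simp [pvASkipWs]
      have h2 : pvAEnd ([] : List Char) 0 = 0 := by simp [pvAEnd]
      have h3 : pvBSpans ([] : List Char) = [(0, 0)] := by
        simp [pvBSpans, PySem.List.enumerate]
      simp [pvAStart, h1, h2, h3, PySem.List.pyGet?, PySem.List.pyIdx?,
        PySem.Chars.strip, PySem.Chars.lstrip, PySem.Chars.rstrip,
        List.find?]
    · have hlt : C.toNat < text.toList.length := by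
        have hlow : (PySem.Chars.lower text.toList).length = text.toList.length := by
          simp [PySem.Chars.lower]
        have hne : PySem.Chars.lower text.toList ≠ [] := by
          intro h
          rw [h] at hlow
          simp at hlow
          exact hnil (List.eq_nil_of_length_eq_zero hlow.symm)
        have := pvFind_lt_of_ne (PySem.Chars.lower text.toList)
          (PySem.Chars.lower term.toList) hne (by rw [← hC]; exact hI)
        rw [← hC, hlow] at this
        exact this
      obtain ⟨sp, hfind, hs⟩ := pvCore text.toList C.toNat hlt
      rw [hcast]
      simp only [Int.toNat_natCast]
      rw [hfind]
      simp only [Option.getD_some]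
      rw [hs]
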